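-- pv_equiv track=rewrite | github.com/zztaurus/algorithm_camp | week_6/numDecodings.py | numDecodings_2
-- ===== SOURCE A (Python) =====
-- def numDecodings_2(s):
--
--     """
--     f[i] 时只依赖 f[i-1] 和 f[i-2] 两个状态, 所以通过维护两个变量然后取消dp数组
--
--     采用与「滚动数组」类似的思路，只创建长度为 3 的数组，通过取余的方式来复用不再需要的下标。
--
--     """
--
--     n = len(s)
--     s = ' ' + s
--     f = [0] * 3
--     f[0] = 1
--     for i in range(1, n + 1):
--         f[i % 3] = 0
--         a = ord(s[i]) - ord('0')
--         b = (ord(s[i - 1]) - ord('0')) * 10 + ord(s[i]) - ord('0')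
--         if 1 <= a <= 9:
--             f[i % 3] = f[(i - 1) % 3]
--         if 10 <= b <= 26:
--             f[i % 3] += f[(i - 2) % 3]
--     return f[n % 3]
-- ===== SOURCE B (Python) =====
-- def numDecodings_2(s):
--     """Transfer-matrix formulation: position i yields a 2x2 matrix A_i with
--     (1,0)*A_1*...*A_n = (f_n, f_{n-1}); the product is computed by balanced
--     divide-and-conquer over index ranges (associativity), not a linear DP sweep."""
--     n = len(s)
--     if n == 0:
--         return 1
--
--     def mat(i):
--         a = ord(s[i]) - 48
--         w1 = 1 if 1 <= a <= 9 else 0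
--         w2 = 0
--         if i > 0 and 10 <= (ord(s[i - 1]) - 48) * 10 + a <= 26:
--             w2 = 1
--         return (w1, 1, w2, 0)
--
--     def mul(p, q):
--         a, b, c, d = p
--         e, f, g, h = q
--         return (a * e + b * g, a * f + b * h, c * e + d * g, c * f + d * h)
--
--     def prod(lo, hi):
--         if hi - lo == 1:
--             return mat(lo)
--         mid = (lo + hi) // 2
--         return mul(prod(lo, mid), prod(mid, hi))
--
--     return prod(0, n)[0]
-- ===== Notes on version B (the rewrite author's own statement) =====
-- stated objective: alternative
-- what changed: Replaces the forward rolling-array DP by a transfer-matrix formulation: each position becomes a 2x2 matrix and the answer is the top-left entry of their product, computed by balanced divide-and-conquer (valid by associativity) rather than any linear DP sweep.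
import Mathlib
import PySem

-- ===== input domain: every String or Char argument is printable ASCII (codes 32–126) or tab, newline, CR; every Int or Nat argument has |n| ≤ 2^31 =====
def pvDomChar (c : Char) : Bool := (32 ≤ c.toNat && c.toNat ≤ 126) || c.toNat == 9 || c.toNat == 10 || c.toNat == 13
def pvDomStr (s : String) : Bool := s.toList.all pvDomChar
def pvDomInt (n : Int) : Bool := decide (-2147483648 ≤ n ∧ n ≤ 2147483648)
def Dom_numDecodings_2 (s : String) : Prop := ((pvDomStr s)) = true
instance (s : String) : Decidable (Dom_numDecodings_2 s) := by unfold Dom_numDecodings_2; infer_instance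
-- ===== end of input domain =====

-- B replaces A's forward rolling-array DP by a transfer-matrix formulation: each position
-- becomes a 2x2 matrix and the answer is the top-left entry of their product, computed by
-- balanced divide-and-conquer (associativity); same result, different algorithm.

-- ===== PORT A =====
-- one loop iteration of A (i : Int is the Python loop variable); all list indices are
-- in range wherever the port is applied, so the totalized pyGetD/pySetD are exact
def stepA (p : List Char) (f : List Int) (i : Int) : List Int :=
  let f1 := PySem.List.pySetD f (PySem.Int.mod i 3) 0
  let a : Int := ((PySem.List.pyGetD p i ' ').toNat : Int) - 48
  let b : Int := (((PySem.List.pyGetD p (i - 1) ' ').toNat : Int) - 48) * 10 +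
      ((PySem.List.pyGetD p i ' ').toNat : Int) - 48
  let f2 := if 1 ≤ a ∧ a ≤ 9 then
      PySem.List.pySetD f1 (PySem.Int.mod i 3) (PySem.List.pyGetD f1 (PySem.Int.mod (i - 1) 3) 0)
    else f1
  if 10 ≤ b ∧ b ≤ 26 then
    PySem.List.pySetD f2 (PySem.Int.mod i 3)
      (PySem.List.pyGetD f2 (PySem.Int.mod i 3) 0 + PySem.List.pyGetD f2 (PySem.Int.mod (i - 2) 3) 0)
  else f2

def numDecodings_2 (s : String) : Int :=
  let n : Int := (s.toList.length : Int)
  let p : List Char := ' ' :: s.toList          -- s = ' ' + s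
  let f : List Int := PySem.List.pySetD [0, 0, 0] 0 1   -- f = [0]*3; f[0] = 1
  let f := (PySem.List.pyRange 1 (n + 1) 1).foldl (stepA p) f
  PySem.List.pyGetD f (PySem.Int.mod n 3) 0

-- ===== PORT B =====
-- Source B's mat(i): the transfer matrix (w1, 1, w2, 0) of position i (indices in range where applied)
def matB (cs : List Char) (i : Nat) : Int × Int × Int × Int :=
  let a : Int := ((cs.getD i ' ').toNat : Int) - 48
  let w1 : Int := if 1 ≤ a ∧ a ≤ 9 then 1 else 0
  let w2 : Int := if 0 < i ∧ 10 ≤ (((cs.getD (i - 1) ' ').toNat : Int) - 48) * 10 + a ∧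
      (((cs.getD (i - 1) ' ').toNat : Int) - 48) * 10 + a ≤ 26 then 1 else 0
  (w1, 1, w2, 0)

-- Source B's mul: 2x2 matrix product on (a,b,c,d) quadruples
def mulM (p q : Int × Int × Int × Int) : Int × Int × Int × Int :=
  match p, q with
  | (a, b, c, d), (e, f, g, h) => (a * e + b * g, a * f + b * h, c * e + d * g, c * f + d * h)

-- Source B's prod(lo,hi): balanced divide-and-conquer product of matB lo .. matB (hi-1);
-- Python tests 'hi - lo == 1'; prod is only invoked with lo < hi, where 'hi ≤ lo + 1'
-- coincides with it (and makes the recursion total)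
def prodB (cs : List Char) (lo hi : Nat) : Int × Int × Int × Int :=
  if h : hi ≤ lo + 1 then matB cs lo
  else mulM (prodB cs lo ((lo + hi) / 2)) (prodB cs ((lo + hi) / 2) hi)
termination_by hi - lo
decreasing_by all_goals omega

def numDecodings_2_alt (s : String) : Int :=
  let cs := s.toList
  let n := cs.length
  if n = 0 then 1 else (prodB cs 0 n).1

-- ===== PRECONDITION & SPEC =====
def Spec_numDecodings_2 (s : String) (out : Int) : Prop := out = numDecodings_2_alt s
instance (s : String) (out : Int) : Decidable (Spec_numDecodings_2 s out) := by unfold Spec_numDecodings_2; infer_instance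

-- ===== CLAIM (what is proved, stated in full; the proofs are below) =====
def Claim_equal_numDecodings_2 : Prop := ∀ (s : String), Dom_numDecodings_2 s → Spec_numDecodings_2 s (numDecodings_2 s)

-- ===== LEMMAS AND PROOFS =====

-- 0/1 weight of a single-char decode and of a two-char decode
def w1 (c : Char) : Int := if 1 ≤ (c.toNat : Int) - 48 ∧ (c.toNat : Int) - 48 ≤ 9 then 1 else 0
def w2 (c c' : Char) : Int :=
  if 10 ≤ ((c.toNat : Int) - 48) * 10 + (c'.toNat : Int) - 48 ∧
      ((c.toNat : Int) - 48) * 10 + (c'.toNat : Int) - 48 ≤ 26 then 1 else 0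

-- number of decodings of a character list (front recursion)
def N : List Char → Int
  | [] => 1
  | [c] => w1 c
  | c :: c' :: t => w1 c * N (c' :: t) + w2 c c' * N t

-- prefix value, negative arguments mapped to 0 (the unused rolling-array slots)
def prefN (cs : List Char) (m : Int) : Int := if m < 0 then 0 else N (cs.take m.toNat)

-- the exact contents of A's 3-slot array after processing prefix of length k
def FA (cs : List Char) (k : Int) : List Int :=
  if k % 3 = 0 then [prefN cs k, prefN cs (k - 2), prefN cs (k - 1)]
  else if k % 3 = 1 then [prefN cs (k - 1), prefN cs k, prefN cs (k - 2)]
  else [prefN cs (k - 2), prefN cs (k - 1), prefN cs k]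

-- back recursion for N (append two chars)
theorem N_flip (d c : Char) (l : List Char) :
    N (l ++ [d, c]) = w1 c * N (l ++ [d]) + w2 d c * N l := by
  induction l using N.induct with
  | case1 => simp [N]; ring
  | case2 x => simp [N]; ring
  | case3 x y t ih1 ih2 =>
      simp only [List.cons_append] at *
      rw [N, N, N, ih1, ih2]
      ring

-- the prefix-count recurrence A's loop implements (pair char read through the sentinel)
theorem prefN_succ (cs : List Char) (k : Nat) (h : k < cs.length) :
    prefN cs ((k : Int) + 1)
      = w1 cs[k] * prefN cs (k : Int) + w2 ((' ' :: cs).getD k ' ') cs[k] * prefN cs ((k : Int) - 1) := by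
  have htake : cs.take (k + 1) = cs.take k ++ [cs[k]] := by
    rw [List.take_succ]
    simp [List.getElem?_eq_getElem h]
  rcases k with _ | m
  · simp [prefN, htake, N]
  · have hm : m < cs.length := by omega
    have htakem : cs.take (m + 1) = cs.take m ++ [cs[m]] := by
      rw [List.take_succ]; simp [List.getElem?_eq_getElem hm]
    have e1 : prefN cs (((m + 1 : Nat) : Int) + 1) = N (cs.take m ++ [cs[m], cs[m + 1]]) := by
      have e : ((((m + 1 : Nat) : Int) + 1)).toNat = m + 1 + 1 := by omega
      simp only [prefN, if_neg (by omega : ¬ (((m + 1 : Nat) : Int) + 1 < 0)), e]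
      rw [htake, htakem, List.append_assoc]
      rfl
    have e2 : prefN cs ((m + 1 : Nat) : Int) = N (cs.take m ++ [cs[m]]) := by
      simp only [prefN, if_neg (by omega : ¬ (((m + 1 : Nat) : Int) < 0))]
      have e : (((m + 1 : Nat) : Int)).toNat = m + 1 := by omega
      rw [e, htakem]
    have e3 : prefN cs (((m + 1 : Nat) : Int) - 1) = N (cs.take m) := by
      simp only [prefN, if_neg (by omega : ¬ ((((m + 1 : Nat) : Int) - 1) < 0))]
      have e : ((((m + 1 : Nat) : Int) - 1)).toNat = m := by omega
      rw [e]
    rw [e1, e2, e3, N_flip]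
    have e4 : (' ' :: cs).getD (m + 1) ' ' = cs[m] := by
      simp [List.getD_eq_getElem?_getD, List.getElem?_eq_getElem hm]
    rw [e4]

-- A's loop body sends the 3-slot array for prefix k to the one for prefix k+1
theorem FA_0 (cs : List Char) (k : Int) (h : k % 3 = 0) :
    FA cs k = [prefN cs k, prefN cs (k - 2), prefN cs (k - 1)] := by simp [FA, h]
theorem FA_1 (cs : List Char) (k : Int) (h : k % 3 = 1) :
    FA cs k = [prefN cs (k - 1), prefN cs k, prefN cs (k - 2)] := by simp [FA, h]
theorem FA_2 (cs : List Char) (k : Int) (h : k % 3 = 2) :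
    FA cs k = [prefN cs (k - 2), prefN cs (k - 1), prefN cs k] := by simp [FA, h]

theorem stepA_key (cs : List Char) (k : Nat) (h : k < cs.length) :
    stepA (' ' :: cs) (FA cs (k : Int)) ((k : Int) + 1) = FA cs ((k : Int) + 1) := by
  have hP1 : PySem.List.pyGetD (' ' :: cs) ((k : Int) + 1) ' ' = cs[k] := by
    have e : ((k : Int) + 1) = ((k + 1 : Nat) : Int) := by push_cast; ring
    rw [e, PySem.List.pyGetD_natCast]
    simp [List.getD_eq_getElem?_getD,
      List.getElem?_eq_getElem (show k + 1 < (' ' :: cs).length by simp; omega)]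
  have hP0 : PySem.List.pyGetD (' ' :: cs) (((k : Int) + 1) - 1) ' ' = (' ' :: cs).getD k ' ' := by
    have e : (((k : Int) + 1) - 1) = ((k : Nat) : Int) := by ring
    rw [e, PySem.List.pyGetD_natCast]
  have hm0 : PySem.Int.mod ((k : Int) + 1) 3 = ((k : Int) + 1) % 3 :=
    PySem.Int.mod_eq_emod_of_pos (by omega)
  have hm1 : PySem.Int.mod (((k : Int) + 1) - 1) 3 = (k : Int) % 3 := by
    rw [show (((k : Int) + 1) - 1) = (k : Int) by ring]
    exact PySem.Int.mod_eq_emod_of_pos (by omega)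
  have hm2 : PySem.Int.mod (((k : Int) + 1) - 2) 3 = ((k : Int) - 1) % 3 := by
    rw [show (((k : Int) + 1) - 2) = ((k : Int) - 1) by ring]
    exact PySem.Int.mod_eq_emod_of_pos (by omega)
  have hrec := prefN_succ cs k h
  have h3 : k % 3 = 0 ∨ k % 3 = 1 ∨ k % 3 = 2 := by omega
  unfold stepA
  simp only [hP1, hP0, hm0, hm1, hm2]
  rcases h3 with h3 | h3 | h3
  · rw [FA_0 cs (k : Int) (by omega), FA_1 cs ((k : Int) + 1) (by omega),
      show ((k : Int)) % 3 = 0 by omega, show ((k : Int) + 1) % 3 = 1 by omega,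
      show ((k : Int) - 1) % 3 = 2 by omega,
      show ((k : Int) + 1 - 1) = (k : Int) by ring,
      show ((k : Int) + 1 - 2) = ((k : Int) - 1) by ring, hrec]
    unfold w1 w2
    split_ifs <;>
      simp [PySem.List.pySetD_of_nonneg, PySem.List.pyGetD_eq_getElem]
  · rw [FA_1 cs (k : Int) (by omega), FA_2 cs ((k : Int) + 1) (by omega),
      show ((k : Int)) % 3 = 1 by omega, show ((k : Int) + 1) % 3 = 2 by omega,
      show ((k : Int) - 1) % 3 = 0 by omega,
      show ((k : Int) + 1 - 1) = (k : Int) by ring,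
      show ((k : Int) + 1 - 2) = ((k : Int) - 1) by ring, hrec]
    unfold w1 w2
    split_ifs <;>
      simp [PySem.List.pySetD_of_nonneg, PySem.List.pyGetD_eq_getElem]
  · rw [FA_2 cs (k : Int) (by omega), FA_0 cs ((k : Int) + 1) (by omega),
      show ((k : Int)) % 3 = 2 by omega, show ((k : Int) + 1) % 3 = 0 by omega,
      show ((k : Int) - 1) % 3 = 1 by omega,
      show ((k : Int) + 1 - 1) = (k : Int) by ring,
      show ((k : Int) + 1 - 2) = ((k : Int) - 1) by ring, hrec]
    unfold w1 w2
    split_ifs <;>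
      simp [PySem.List.pySetD_of_nonneg, PySem.List.pyGetD_eq_getElem]

-- A loop invariant
theorem A_inv (cs : List Char) (k : Nat) (h : k ≤ cs.length) :
    (PySem.List.pyRange 1 ((k : Int) + 1) 1).foldl (stepA (' ' :: cs)) [1, 0, 0] = FA cs k := by
  induction k with
  | zero =>
      rw [PySem.List.pyRange_one_eq_nil (by omega)]
      simp [FA, prefN, N]
  | succ m ih =>
      have e : ((m + 1 : Nat) : Int) + 1 = ((m : Int) + 1) + 1 := by push_cast; ring
      rw [e, PySem.List.pyRange_one_succ_right (by omega)]
      rw [List.foldl_append, ih (by omega)]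
      simp only [List.foldl_cons, List.foldl_nil]
      rw [stepA_key cs m (by omega)]
      norm_cast

theorem A_eq_N (s : String) : numDecodings_2 s = N s.toList := by
  unfold numDecodings_2
  set cs := s.toList with hcs
  have hinit : PySem.List.pySetD ([0, 0, 0] : List Int) 0 1 = [1, 0, 0] := by decide
  simp only [hinit]
  rw [A_inv cs cs.length le_rfl]
  have hmod : PySem.Int.mod (cs.length : Int) 3 = (cs.length : Int) % 3 :=
    PySem.Int.mod_eq_emod_of_pos (by omega)
  have hN : prefN cs (cs.length : Int) = N cs := by
    simp [prefN]
  have h3 : (cs.length : Int) % 3 = 0 ∨ (cs.length : Int) % 3 = 1 ∨ (cs.length : Int) % 3 = 2 := by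
    omega
  rw [hmod]
  rcases h3 with h3 | h3 | h3 <;>
    simp [FA, h3, hN, PySem.List.pyGetD_eq_getElem]

-- ===== B-side lemmas: the matrix product =====

def idM : Int × Int × Int × Int := (1, 0, 0, 1)

-- left-to-right product of matB lo .. matB (lo+k-1)
def PM (cs : List Char) (lo : Nat) : Nat → Int × Int × Int × Int
  | 0 => idM
  | k + 1 => mulM (PM cs lo k) (matB cs (lo + k))

theorem mulM_assoc (p q r : Int × Int × Int × Int) :
    mulM (mulM p q) r = mulM p (mulM q r) := by
  obtain ⟨a, b, c, d⟩ := p; obtain ⟨e, f, g, h⟩ := q; obtain ⟨x, y, z, w⟩ := r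
  simp [mulM]; refine ⟨by ring, by ring, by ring, by ring⟩

theorem mulM_one (p : Int × Int × Int × Int) : mulM idM p = p := by
  obtain ⟨a, b, c, d⟩ := p; simp [mulM, idM]

theorem mulM_one' (p : Int × Int × Int × Int) : mulM p idM = p := by
  obtain ⟨a, b, c, d⟩ := p; simp [mulM, idM]

theorem PM_split (cs : List Char) (lo k m : Nat) :
    PM cs lo (k + m) = mulM (PM cs lo k) (PM cs (lo + k) m) := by
  induction m with
  | zero => simp [PM, mulM_one']
  | succ j ih =>
      have e : k + (j + 1) = (k + j) + 1 := by omega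
      rw [e, PM, PM, ih, mulM_assoc, show lo + (k + j) = lo + k + j from by omega]

theorem prodB_eq_PM (cs : List Char) (d lo hi : Nat) (hd : hi - lo = d) (h : lo < hi) :
    prodB cs lo hi = PM cs lo (hi - lo) := by
  induction d using Nat.strong_induction_on generalizing lo hi with
  | _ d ih =>
    rw [prodB]
    by_cases hle : hi ≤ lo + 1
    · have : hi - lo = 1 := by omega
      rw [dif_pos hle, this, PM, PM, mulM_one, Nat.add_zero]
    · rw [dif_neg hle]
      have h1 : lo < (lo + hi) / 2 := by omega
      have h2 : (lo + hi) / 2 < hi := by omega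
      rw [ih ((lo + hi) / 2 - lo) (by omega) lo ((lo + hi) / 2) rfl h1,
        ih (hi - (lo + hi) / 2) (by omega) ((lo + hi) / 2) hi rfl h2]
      have hsp := PM_split cs lo ((lo + hi) / 2 - lo) (hi - (lo + hi) / 2)
      rw [show lo + ((lo + hi) / 2 - lo) = (lo + hi) / 2 from by omega,
        show (lo + hi) / 2 - lo + (hi - (lo + hi) / 2) = hi - lo from by omega] at hsp
      exact hsp.symm

-- row vector times matrix
def vmul (v : Int × Int) (p : Int × Int × Int × Int) : Int × Int :=
  (v.1 * p.1 + v.2 * p.2.2.1, v.1 * p.2.1 + v.2 * p.2.2.2)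

theorem vmul_mul (v : Int × Int) (p q : Int × Int × Int × Int) :
    vmul v (mulM p q) = vmul (vmul v p) q := by
  obtain ⟨x, y⟩ := v; obtain ⟨a, b, c, d⟩ := p; obtain ⟨e, f, g, h⟩ := q
  simp [vmul, mulM]; constructor <;> ring

-- the matB entries are the weights of A's recurrence
theorem matB_w1 (cs : List Char) (k : Nat) (h : k < cs.length) :
    (matB cs k).1 = w1 cs[k] := by
  simp [matB, w1, List.getD_eq_getElem?_getD, List.getElem?_eq_getElem h]

-- (1,0) times the running product is the pair of consecutive prefix counts
theorem PM_prefN (cs : List Char) (k : Nat) (h : k ≤ cs.length) :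
    vmul (1, 0) (PM cs 0 k) = (prefN cs (k : Int), prefN cs ((k : Int) - 1)) := by
  induction k with
  | zero => simp [PM, idM, vmul, prefN, N]
  | succ m ih =>
      rw [PM, Nat.zero_add, vmul_mul, ih (by omega)]
      have hm : m < cs.length := by omega
      have h21 : (matB cs m).2.1 = 1 := rfl
      have h222 : (matB cs m).2.2.2 = 0 := rfl
      have hpair : prefN cs ((m : Int) - 1) * (matB cs m).2.2.1
          = w2 ((' ' :: cs).getD m ' ') cs[m] * prefN cs ((m : Int) - 1) := by
        rcases m with _ | j
        · simp [matB, prefN]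
        · have hj : j < cs.length := by omega
          have hg1 : cs.getD (j + 1) ' ' = cs[j + 1] := by
            simp [List.getD_eq_getElem?_getD, List.getElem?_eq_getElem hm]
          have hg0 : cs.getD (j + 1 - 1) ' ' = cs[j] := by
            simp [List.getD_eq_getElem?_getD, List.getElem?_eq_getElem hj]
          have hs : (' ' :: cs).getD (j + 1) ' ' = cs[j] := by
            simp [List.getD_eq_getElem?_getD, List.getElem?_eq_getElem hj]
          simp only [matB, hg1, hg0, hs, w2]
          split_ifs <;> first | ring1 | (exfalso; omega)
      have e1 : ((m + 1 : Nat) : Int) = (m : Int) + 1 := by push_cast; ring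
      unfold vmul
      simp only [matB_w1 cs m hm, h21, h222, e1, Prod.mk.injEq]
      refine ⟨?_, ?_⟩
      · rw [mul_comm (prefN cs (m : Int)) (w1 cs[m]), hpair, prefN_succ cs m hm]
      · rw [show (m : Int) + 1 - 1 = (m : Int) by ring]
        ring

theorem B_eq_N (s : String) : numDecodings_2_alt s = N s.toList := by
  unfold numDecodings_2_alt
  set cs := s.toList with hcs
  by_cases h : cs.length = 0
  · simp [List.length_eq_zero_iff.mp h, N]
  · simp only [if_neg h]
    rw [prodB_eq_PM cs cs.length 0 cs.length (by omega) (by omega)]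
    simp only [Nat.sub_zero]
    have h2 := PM_prefN cs cs.length le_rfl
    have h3 : (PM cs 0 cs.length).1 = (vmul (1, 0) (PM cs 0 cs.length)).1 := by
      simp [vmul]
    rw [h3, h2]
    simp [prefN]

-- ===== VERDICT (by name: the statement is the Claim_ definition above) =====
theorem numDecodings_2_spec : Claim_equal_numDecodings_2 := by
  intro s _
  unfold Spec_numDecodings_2
  rw [A_eq_N, B_eq_N]
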